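-- pv_equiv track=rewrite | github.com/vtt3-research/airi | core/utils.py | array_to_str_for_score
-- ===== SOURCE A (Python) =====
-- def array_to_str_for_score(arr):
--     start_number = 1
--     end_number = 2
--     null_number = 0
--     out = ''
--     for i in range(len(arr)):
--         if arr[i] == start_number:
--             continue
--         elif arr[i] == null_number:
--             break
--         elif arr[i] == end_number:
--             out += str(arr[i]) + ' '
--             break
--         else:
--             out += str(arr[i]) + ' '
--     return out.strip()
-- ===== SOURCE B (Python) =====
-- def array_to_str_for_score(arr):
--     # Phase 1: locate the cut boundary (first 0 exclusive, or first 2 inclusive).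
--     cut = len(arr)
--     inclusive = False
--     for i, x in enumerate(arr):
--         if x == 0:
--             cut = i
--             break
--         if x == 2:
--             cut = i
--             inclusive = True
--             break
--     # Phase 2: materialise the kept prefix, drop start tokens (1), join.
--     prefix = arr[:cut] + ([2] if inclusive else [])
--     return ' '.join(str(x) for x in prefix if x != 1)
-- ===== Notes on version B (the rewrite author's own statement) =====
-- stated objective: alternative
-- what changed: A's single scan that accumulates a string token-by-token (with continue/break cases) is replaced by a two-phase decomposition: one loop locates the cut boundary (first 0 exclusive, first 2 inclusive), then the prefix is sliced, 1s filtered out, elements stringified and space-joined in one expression.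
import Mathlib
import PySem

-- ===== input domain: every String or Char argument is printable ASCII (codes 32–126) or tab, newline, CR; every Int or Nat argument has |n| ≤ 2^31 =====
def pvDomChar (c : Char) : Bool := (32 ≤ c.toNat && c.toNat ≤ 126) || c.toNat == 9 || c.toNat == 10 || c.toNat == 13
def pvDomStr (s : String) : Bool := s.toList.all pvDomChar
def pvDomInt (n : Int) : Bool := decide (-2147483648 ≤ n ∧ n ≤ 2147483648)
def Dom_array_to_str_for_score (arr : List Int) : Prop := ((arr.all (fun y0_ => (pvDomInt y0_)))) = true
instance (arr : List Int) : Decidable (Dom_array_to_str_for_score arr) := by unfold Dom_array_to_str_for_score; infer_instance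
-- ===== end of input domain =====

-- B replaces A's single accumulating scan by a locate-boundary-then-materialise two-phase
-- decomposition (find cut index, then slice/filter/map/join); objective: alternative structure.


-- ===== PORT A =====
-- A's loop over range(len(arr)) with the string accumulator `out`, branches in A's order
-- (kept on the List Char side; PySem.Chars/Int.toChars are the exact Python primitives).
def pvALoop : List Int → List Char → List Char
  | [], out => out
  | x :: rest, out =>
    if x = 1 then pvALoop rest out                                -- start token: continue
    else if x = 0 then out                                        -- null token: break
    else if x = 2 then out ++ PySem.Int.toChars x ++ [' ']        -- end token: append, break
    else pvALoop rest (out ++ PySem.Int.toChars x ++ [' '])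

def array_to_str_for_score (arr : List Int) : String :=
  String.mk (PySem.Chars.strip (pvALoop arr []))

-- ===== PORT B =====
-- Source B phase 1: first index of 0 (exclusive cut) or of 2 (inclusive cut); default len(arr).
def pvBCut : List Int → Nat × Bool
  | [] => (0, false)
  | x :: rest =>
    if x = 0 then (0, false)
    else if x = 2 then (0, true)
    else ((pvBCut rest).1 + 1, (pvBCut rest).2)

-- Source B phase 2: slice the prefix, append 2 if inclusive, drop 1s, str-map, ' '.join.
def array_to_str_for_score_alt (arr : List Int) : String :=
  let r := pvBCut arr
  let pre := arr.take r.1 ++ (if r.2 then [(2 : Int)] else [])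
  String.mk (PySem.Chars.join [' '] ((pre.filter (fun x => x != 1)).map PySem.Int.toChars))

-- ===== PRECONDITION & SPEC =====
def Spec_array_to_str_for_score (arr : List Int) (out : String) : Prop := out = array_to_str_for_score_alt arr
instance (arr : List Int) (out : String) : Decidable (Spec_array_to_str_for_score arr out) := by unfold Spec_array_to_str_for_score; infer_instance

-- ===== CLAIM (what is proved, stated in full; the proofs are below) =====
def Claim_equal_array_to_str_for_score : Prop := ∀ (arr : List Int), Dom_array_to_str_for_score arr → Spec_array_to_str_for_score arr (array_to_str_for_score arr)

-- ===== LEMMAS AND PROOFS =====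

-- The list of integers both programs keep, as one recursion (proof-only helper).
def pvToks : List Int → List Int
  | [] => []
  | x :: rest =>
    if x = 1 then pvToks rest
    else if x = 0 then []
    else if x = 2 then [2]
    else x :: pvToks rest

lemma pvALoop_append (arr : List Int) : ∀ out : List Char,
    pvALoop arr out = out ++ pvALoop arr [] := by
  induction arr with
  | nil => intro out; simp [pvALoop]
  | cons x rest ih =>
    intro out
    by_cases h1 : x = 1
    · simp [pvALoop, h1, ih out]
    · by_cases h0 : x = 0
      · simp [pvALoop, h0]
      · by_cases h2 : x = 2
        · simp [pvALoop, h2]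
        · simp only [pvALoop, if_neg h1, if_neg h0, if_neg h2]
          rw [ih (out ++ PySem.Int.toChars x ++ [' ']), ih ([] ++ PySem.Int.toChars x ++ [' '])]
          simp

lemma pvALoop_eq_flatMap (arr : List Int) :
    pvALoop arr [] = (pvToks arr).flatMap (fun x => PySem.Int.toChars x ++ [' ']) := by
  induction arr with
  | nil => simp [pvALoop, pvToks]
  | cons x rest ih =>
    by_cases h1 : x = 1
    · simp [pvALoop, pvToks, h1, ih]
    · by_cases h0 : x = 0
      · simp [pvALoop, pvToks, h0]
      · by_cases h2 : x = 2
        · simp [pvALoop, pvToks, h2]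
        · simp only [pvALoop, pvToks, if_neg h1, if_neg h0, if_neg h2]
          rw [pvALoop_append rest, ih]
          simp

lemma pvB_tokens (arr : List Int) :
    ((arr.take (pvBCut arr).1 ++ (if (pvBCut arr).2 then [(2 : Int)] else [])).filter
        (fun x => x != 1)) = pvToks arr := by
  induction arr with
  | nil => simp [pvBCut, pvToks]
  | cons x rest ih =>
    by_cases h0 : x = 0
    · simp [pvBCut, pvToks, h0]
    · by_cases h2 : x = 2
      · simp [pvBCut, pvToks, h2]
      · by_cases h1 : x = 1
        · simp only [pvBCut, pvToks, h1] at *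
          simpa using ih
        · have hx : (x != 1) = true := by simp [h1]
          simp only [pvBCut, if_neg h0, if_neg h2, pvToks, if_neg h1, List.take_succ_cons,
            List.cons_append, List.filter_cons, hx, if_pos]
          rw [← ih]

-- str(n) facts: nonempty and free of whitespace characters.
lemma pv_digitChar_not_space (m : Nat) : PySem.Chars.isspace (Nat.digitChar m) = false := by
  by_cases h : m < 16
  · interval_cases m <;> decide
  · have h0 : m ≠ 0 := by omega
    have h1 : m ≠ 1 := by omega
    have h2 : m ≠ 2 := by omega
    have h3 : m ≠ 3 := by omega
    have h4 : m ≠ 4 := by omega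
    have h5 : m ≠ 5 := by omega
    have h6 : m ≠ 6 := by omega
    have h7 : m ≠ 7 := by omega
    have h8 : m ≠ 8 := by omega
    have h9 : m ≠ 9 := by omega
    have h10 : m ≠ 10 := by omega
    have h11 : m ≠ 11 := by omega
    have h12 : m ≠ 12 := by omega
    have h13 : m ≠ 13 := by omega
    have h14 : m ≠ 14 := by omega
    have h15 : m ≠ 15 := by omega
    simp only [Nat.digitChar, if_neg h0, if_neg h1, if_neg h2, if_neg h3, if_neg h4, if_neg h5,
      if_neg h6, if_neg h7, if_neg h8, if_neg h9, if_neg h10, if_neg h11, if_neg h12,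
      if_neg h13, if_neg h14, if_neg h15]
    decide

lemma pv_toDigitsCore_append (f : Nat) : ∀ (n : Nat) (acc : List Char),
    Nat.toDigitsCore 10 f n acc = Nat.toDigitsCore 10 f n [] ++ acc := by
  induction f with
  | zero => intro n acc; simp [Nat.toDigitsCore]
  | succ f ih =>
    intro n acc
    simp only [Nat.toDigitsCore]
    by_cases h : n / 10 = 0
    · simp [h]
    · simp only [if_neg h]
      rw [ih (n / 10) ((n % 10).digitChar :: acc), ih (n / 10) [(n % 10).digitChar]]
      simp

lemma pv_toDigitsCore_not_space (f : Nat) : ∀ (n : Nat) (c : Char),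
    c ∈ Nat.toDigitsCore 10 f n [] → PySem.Chars.isspace c = false := by
  induction f with
  | zero => intro n c hc; simp [Nat.toDigitsCore] at hc
  | succ f ih =>
    intro n c hc
    simp only [Nat.toDigitsCore] at hc
    by_cases h : n / 10 = 0
    · simp [h] at hc; subst hc; exact pv_digitChar_not_space _
    · rw [if_neg h, pv_toDigitsCore_append] at hc
      rcases List.mem_append.mp hc with h' | h'
      · exact ih _ _ h'
      · simp at h'; subst h'; exact pv_digitChar_not_space _

lemma pv_toDigits_ne_nil (n : Nat) : Nat.toDigits 10 n ≠ [] := by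
  show Nat.toDigitsCore 10 (n + 1) n [] ≠ []
  simp only [Nat.toDigitsCore]
  by_cases h : n / 10 = 0
  · simp [h]
  · rw [if_neg h, pv_toDigitsCore_append]; simp

lemma pv_toChars_ne_nil (x : Int) : PySem.Int.toChars x ≠ [] := by
  unfold PySem.Int.toChars
  split_ifs
  · simp
  · exact pv_toDigits_ne_nil _

lemma pv_toChars_not_space (x : Int) : ∀ c ∈ PySem.Int.toChars x, PySem.Chars.isspace c = false := by
  intro c hc
  unfold PySem.Int.toChars at hc
  split_ifs at hc
  · rcases List.mem_cons.mp hc with h | h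
    · subst h; decide
    · exact pv_toDigitsCore_not_space _ _ _ h
  · exact pv_toDigitsCore_not_space _ _ _ hc

-- rstrip / lstrip facts for the join shape.
lemma pv_rstrip_concat (v : List Char) (c : Char) (hc : PySem.Chars.isspace c = false) :
    PySem.Chars.rstrip (v ++ [c]) = v ++ [c] := by
  simp [PySem.Chars.rstrip, hc]

lemma pv_rstrip_append (a b : List Char) (hb : PySem.Chars.rstrip b ≠ []) :
    PySem.Chars.rstrip (a ++ b) = a ++ PySem.Chars.rstrip b := by
  unfold PySem.Chars.rstrip at *
  rw [List.reverse_append, List.dropWhile_append]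
  split_ifs with h
  · exfalso
    apply hb
    rw [List.isEmpty_iff] at h
    simp [h]
  · simp

def pvGood (ts : List (List Char)) : Prop :=
  ∀ t ∈ ts, t ≠ [] ∧ ∀ c ∈ t, PySem.Chars.isspace c = false

lemma pv_rstrip_token (t : List Char) (h : t ≠ [] ∧ ∀ c ∈ t, PySem.Chars.isspace c = false) :
    PySem.Chars.rstrip (t ++ [' ']) = t := by
  obtain ⟨hne, hns⟩ := h
  rcases List.eq_nil_or_concat t with h | ⟨v, c, rfl⟩
  · exact absurd h hne
  · simp only [List.concat_eq_append]
    have hsp : PySem.Chars.isspace ' ' = true := by decide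
    have : PySem.Chars.rstrip ((v ++ [c]) ++ [' ']) = PySem.Chars.rstrip (v ++ [c]) := by
      simp [PySem.Chars.rstrip, List.dropWhile, hsp]
    rw [this, pv_rstrip_concat v c (hns c (by simp))]

lemma pv_join_ne_nil (t : List Char) (ts : List (List Char)) (ht : t ≠ []) :
    PySem.Chars.join [' '] (t :: ts) ≠ [] := by
  cases ts with
  | nil => rw [PySem.Chars.join_singleton]; exact ht
  | cons t2 ts2 => rw [PySem.Chars.join_cons_cons]; simp [ht]

lemma pv_rstrip_flat (ts : List (List Char)) (h : pvGood ts) :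
    PySem.Chars.rstrip (ts.flatMap (fun t => t ++ [' '])) = PySem.Chars.join [' '] ts := by
  induction ts with
  | nil => decide
  | cons t rest ih =>
    cases rest with
    | nil =>
      simp only [List.flatMap_cons, List.flatMap_nil, List.append_nil, PySem.Chars.join_singleton]
      exact pv_rstrip_token t (h t (by simp))
    | cons t2 ts2 =>
      have hrest : pvGood (t2 :: ts2) := fun u hu => h u (List.mem_cons_of_mem _ hu)
      have ihr := ih hrest
      rw [List.flatMap_cons, pv_rstrip_append _ _ (by
          rw [ihr]; exact pv_join_ne_nil t2 ts2 (hrest t2 (by simp)).1),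
        ihr, PySem.Chars.join_cons_cons]

lemma pv_strip_flat (ts : List (List Char)) (h : pvGood ts) :
    PySem.Chars.strip (ts.flatMap (fun t => t ++ [' '])) = PySem.Chars.join [' '] ts := by
  unfold PySem.Chars.strip
  have hl : PySem.Chars.lstrip (ts.flatMap (fun t => t ++ [' '])) =
      ts.flatMap (fun t => t ++ [' ']) := by
    cases ts with
    | nil => rfl
    | cons t rest =>
      obtain ⟨hne, hns⟩ := h t (by simp)
      rcases t with _ | ⟨c, t'⟩
      · exact absurd rfl hne
      · simp [PySem.Chars.lstrip, hns c (by simp)]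
  rw [hl]
  exact pv_rstrip_flat ts h

lemma pv_main (arr : List Int) : array_to_str_for_score arr = array_to_str_for_score_alt arr := by
  have hB : array_to_str_for_score_alt arr = String.mk (PySem.Chars.join [' ']
      (((arr.take (pvBCut arr).1 ++ (if (pvBCut arr).2 then [(2 : Int)] else [])).filter
        (fun x => x != 1)).map PySem.Int.toChars)) := rfl
  unfold array_to_str_for_score
  rw [hB, pvALoop_eq_flatMap, pvB_tokens]
  congr 1
  have : (pvToks arr).flatMap (fun x => PySem.Int.toChars x ++ [' ']) =
      ((pvToks arr).map PySem.Int.toChars).flatMap (fun t => t ++ [' ']) := by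
    rw [List.flatMap_map]
  rw [this]
  exact pv_strip_flat _ (by
    intro t ht
    rcases List.mem_map.mp ht with ⟨x, _, rfl⟩
    exact ⟨pv_toChars_ne_nil x, pv_toChars_not_space x⟩)

-- ===== VERDICT (by name: the statement is the Claim_ definition above) =====
theorem array_to_str_for_score_spec : Claim_equal_array_to_str_for_score := by
  intro arr _
  unfold Spec_array_to_str_for_score
  exact pv_main arr
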